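-- pv_equiv track=rewrite | github.com/Jaredcscott/Project-Euler | src/python/prob735.py | getDiv
-- ===== SOURCE A (Python) =====
-- from functools import reduce
--
-- def factors(n, limit):
--     return list(reduce(list.__add__,
--                 ([i, n//i] for i in range(1,limit+ 1) if n % i == 0)))
--
-- def getDiv(num):
--   divs = []
--   numB = 2 * (num * num)
--   factorsNum = factors(numB, num)
--   factorsNew = []
--   factorsNum.sort()
--   for factor in factorsNum:
--     if (factor <= num):
--       factorsNew.append(factor)
--     else:
--         break
--   ans = len(factorsNew)
--   return(ans)
-- ===== SOURCE B (Python) =====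
-- def getDiv(num):
--     # One pass over 1..num counting divisors of 2*num*num: no pair lists,
--     # no reduce-concatenation, no sort, no break-scan; O(1) extra space.
--     numB = 2 * num * num
--     count = 0
--     for i in range(1, num + 1):
--         if numB % i == 0:
--             count += 1
--     return count
-- ===== Notes on version B (the rewrite author's own statement) =====
-- stated objective: simpler
-- what changed: B counts qualifying divisors in a single constant-space pass instead of building a list of [i, n//i] pairs via reduce(list.__add__), sorting it and scanning a prefix with break.
-- outside the precondition, e.g. on getDiv(0): A raises TypeError, B returns 0
import Mathlib
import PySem

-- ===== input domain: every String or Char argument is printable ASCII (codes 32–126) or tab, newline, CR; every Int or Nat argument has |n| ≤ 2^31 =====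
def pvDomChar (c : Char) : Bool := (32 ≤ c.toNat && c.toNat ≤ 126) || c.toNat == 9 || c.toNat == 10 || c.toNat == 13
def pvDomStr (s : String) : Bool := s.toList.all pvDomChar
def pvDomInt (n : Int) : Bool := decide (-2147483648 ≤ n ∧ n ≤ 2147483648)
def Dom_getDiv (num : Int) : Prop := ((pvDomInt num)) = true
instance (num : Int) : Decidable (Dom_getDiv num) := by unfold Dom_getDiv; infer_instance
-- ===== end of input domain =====

-- B replaces A's build-pairs / reduce-concatenate / sort / break-scan pipeline by a single
-- constant-space counting pass over 1..num (objective: simpler).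

-- ===== PORT A =====
-- reduce(list.__add__, gen): Python raises TypeError on an empty generator (only when num ≤ 0,
-- excluded by Pre_getDiv); the [] branch here is unreachable under Pre_getDiv.
def pyReduceAppend : List (List Int) → List Int
  | [] => []
  | h :: t => t.foldl (· ++ ·) h

def factors (n : Int) (limit : Int) : List Int :=
  pyReduceAppend (((PySem.List.pyRange 1 (limit + 1) 1).filter
      (fun i => PySem.Int.mod n i == 0)).map (fun i => [i, PySem.Int.floordiv n i]))

-- the 'for factor in factorsNum: … else: break' loop, accumulating factorsNew
def getDivLoop (num : Int) : List Int → List Int → List Int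
  | acc, [] => acc
  | acc, f :: rest => if f ≤ num then getDivLoop num (acc ++ [f]) rest else acc

def getDiv (num : Int) : Int :=
  let numB := 2 * (num * num)
  let factorsNum := factors numB num
  let sortedL := PySem.List.sorted factorsNum (fun x => x) false
  let factorsNew := getDivLoop num [] sortedL
  (factorsNew.length : Int)

-- ===== PORT B =====
def getDiv_alt (num : Int) : Int :=
  let numB := 2 * num * num
  (PySem.List.pyRange 1 (num + 1) 1).foldl
    (fun count i => if PySem.Int.mod numB i == 0 then count + 1 else count) 0

-- ===== PRECONDITION & SPEC =====
-- Pre_ excludes exactly num ≤ 0, where A raises TypeError (reduce over an empty generator).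
def Pre_getDiv (num : Int) : Prop := 1 ≤ num
instance (num : Int) : Decidable (Pre_getDiv num) := by unfold Pre_getDiv; infer_instance
def pvWitness_getDiv : Int := 6

def Spec_getDiv (num : Int) (out : Int) : Prop := out = getDiv_alt num
instance (num : Int) (out : Int) : Decidable (Spec_getDiv num out) := by unfold Spec_getDiv; infer_instance

-- ===== CLAIM (what is proved, stated in full; the proofs are below) =====
def Claim_equal_getDiv : Prop := ∀ (num : Int), Dom_getDiv num → Pre_getDiv num → Spec_getDiv num (getDiv num)

-- ===== LEMMAS AND PROOFS =====

-- B's fold is a countP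
theorem foldl_count_eq (q : Int → Bool) (l : List Int) (c : Int) :
    l.foldl (fun count i => if q i then count + 1 else count) c = c + (l.countP q : Int) := by
  induction l generalizing c with
  | nil => simp
  | cons h t ih =>
      by_cases hq : q h = true <;> simp [hq, ih] <;> try ring

-- reduce(list.__add__, …) is flatten
theorem pyReduceAppend_eq_flatten (l : List (List Int)) : pyReduceAppend l = l.flatten := by
  cases l with
  | nil => rfl
  | cons h t =>
      show t.foldl (· ++ ·) h = _
      induction t generalizing h with
      | nil => simp
      | cons h2 t2 ih => simp [List.foldl_cons, ih (h ++ h2)]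

-- the break loop on a sorted list counts the elements ≤ num
theorem getDivLoop_length (num : Int) : ∀ (l : List Int), l.Pairwise (· ≤ ·) → ∀ (acc : List Int),
    (getDivLoop num acc l).length = acc.length + l.countP (fun x => decide (x ≤ num))
  | [], _, acc => by simp [getDivLoop]
  | f :: rest, hs, acc => by
      rcases List.pairwise_cons.mp hs with ⟨hf, hrest⟩
      by_cases h : f ≤ num
      · have ih := getDivLoop_length num rest hrest (acc ++ [f])
        rw [show getDivLoop num acc (f :: rest) = getDivLoop num (acc ++ [f]) rest from by
          simp [getDivLoop, h], ih]
        simp [List.countP_cons, h]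
        omega
      · simp only [getDivLoop, if_neg h, List.countP_cons]
        have hz : rest.countP (fun x => decide (x ≤ num)) = 0 := by
          rw [List.countP_eq_zero]
          intro a ha
          simp only [decide_eq_true_eq]
          intro hle
          exact h (le_trans (hf a ha) hle)
        simp [hz, h]

-- countP (≤ num) of the flattened pair list = number of small factors
theorem countP_flatten_pairs (num numB : Int) (F : List Int)
    (hmem : ∀ i ∈ F, (i ≤ num) ∧ ¬ (PySem.Int.floordiv numB i ≤ num)) :
    ((F.map (fun i => [i, PySem.Int.floordiv numB i])).flatten).countP
      (fun x => decide (x ≤ num)) = F.length := by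
  induction F with
  | nil => simp
  | cons h t ih =>
      have hh := hmem h (by simp)
      simp only [List.map_cons, List.flatten_cons, List.countP_append, List.countP_cons,
        List.countP_nil, ih (fun i hi => hmem i (List.mem_cons_of_mem _ hi))]
      simp [hh.1, hh.2]
      omega

-- big cofactor: for 1 ≤ i ≤ num, 2·num² // i > num
theorem cofactor_big (num i : Int) (h1 : 1 ≤ i) (h2 : i ≤ num) :
    ¬ (PySem.Int.floordiv (2 * (num * num)) i ≤ num) := by
  have hb : 0 < i := by omega
  have : num + 1 ≤ PySem.Int.floordiv (2 * (num * num)) i := by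
    rw [PySem.Int.le_floordiv_iff_mul_le hb]
    nlinarith
  omega

-- ===== VERDICT (by name: the statement is the Claim_ definition above) =====
theorem getDiv_spec : Claim_equal_getDiv := by
  intro num _ hpre
  unfold Spec_getDiv
  simp only [getDiv, getDiv_alt, factors]
  have h22 : 2 * num * num = 2 * (num * num) := by ring
  rw [h22, foldl_count_eq]
  set numB := 2 * (num * num) with hnumB
  set F := (PySem.List.pyRange 1 (num + 1) 1).filter (fun i => PySem.Int.mod numB i == 0) with hF
  set L := (F.map (fun i => [i, PySem.Int.floordiv numB i])).flatten with hL
  rw [pyReduceAppend_eq_flatten]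
  rw [getDivLoop_length num _ (by
    have := PySem.List.sorted_pairwise L (fun x => x) (κ := Int)
    simpa using this) []]
  have hperm : (PySem.List.sorted L (fun x => x) false).Perm L :=
    PySem.List.sorted_perm L (fun x => x) false
  rw [hperm.countP_eq]
  have hmem : ∀ i ∈ F, (i ≤ num) ∧ ¬ (PySem.Int.floordiv numB i ≤ num) := by
    intro i hi
    have hiR : i ∈ PySem.List.pyRange 1 (num + 1) 1 := List.mem_of_mem_filter hi
    rw [PySem.List.mem_pyRange_one] at hiR
    exact ⟨by omega, cofactor_big num i (by omega) (by omega)⟩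
  rw [hL, countP_flatten_pairs num numB F hmem]
  simp [hF, List.countP_eq_length_filter]
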